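-- pv_equiv track=rewrite | github.com/zhzhhyzh/NoSql-to-MySql | validation.py | is_unique
-- ===== SOURCE A (Python) =====
-- def is_unique(records, field):
--     seen = set()
--     for r in records:
--         if field not in r or r[field] is None:
--             return False
--         v = r[field]
--         if v in seen:
--             return False
--         seen.add(v)
--     return True
-- ===== SOURCE B (Python) =====
-- def is_unique(records, field):
--     # Two separate passes: validity check, then distinct-count comparison.
--     if not all(field in r and r[field] is not None for r in records):
--         return False
--     values = [r[field] for r in records]
--     return len(set(values)) == len(values)
-- ===== Notes on version B (the rewrite author's own statement) =====
-- stated objective: simpler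
-- what changed: Replaces the fused loop with an incremental seen-set and early returns by two separate aggregate passes: an all() validity check followed by a distinct-count comparison len(set(values)) == len(values).
import Mathlib
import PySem

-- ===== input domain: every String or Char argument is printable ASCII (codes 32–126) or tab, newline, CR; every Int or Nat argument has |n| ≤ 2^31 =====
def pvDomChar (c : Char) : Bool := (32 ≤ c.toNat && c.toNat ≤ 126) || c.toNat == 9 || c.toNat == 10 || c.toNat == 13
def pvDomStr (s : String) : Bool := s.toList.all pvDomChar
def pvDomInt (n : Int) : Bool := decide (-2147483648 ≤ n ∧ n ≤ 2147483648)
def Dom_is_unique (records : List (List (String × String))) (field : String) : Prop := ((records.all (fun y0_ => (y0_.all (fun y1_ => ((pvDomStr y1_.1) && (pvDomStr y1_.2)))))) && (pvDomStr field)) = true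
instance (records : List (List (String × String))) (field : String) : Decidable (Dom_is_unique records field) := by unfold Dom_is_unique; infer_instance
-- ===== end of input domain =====

-- B replaces A's fused loop (incremental seen-set, early returns) by two aggregate passes:
-- an all-present validity check, then a distinct-count comparison; objective: simpler.

-- ===== PORT A =====
-- the loop over records with the incrementally built 'seen' set; record values are
-- Strings here, so Python's 'r[field] is None' branch can never fire and is not ported
def isUniqueLoop (field : String) : List (List (String × String)) → PySem.Set String → Bool
  | [], _ => true
  | r :: rest, seen =>
    match (PySem.Dict.mk r).get? field with
    | none => false            -- 'field not in r'
    | some v =>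
      if PySem.Set.contains seen v then false
      else isUniqueLoop field rest (PySem.Set.add seen v)

def is_unique (records : List (List (String × String))) (field : String) : Bool :=
  isUniqueLoop field records PySem.Set.empty

-- ===== PORT B =====
-- pass 1: all(field in r ... for r in records); pass 2: values = [r[field] for r in records]
-- (written as filterMap, total; under the pass-1 guard every lookup is some),
-- then len(set(values)) == len(values)
def is_unique_alt (records : List (List (String × String))) (field : String) : Bool :=
  if records.all (fun r => ((PySem.Dict.mk r).get? field).isSome) then
    let values := records.filterMap (fun r => (PySem.Dict.mk r).get? field)
    PySem.Set.len (PySem.Set.ofList values) == (values.length : Int)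
  else false

-- ===== PRECONDITION & SPEC =====
def Spec_is_unique (records : List (List (String × String))) (field : String) (out : Bool) : Prop := out = is_unique_alt records field
instance (records : List (List (String × String))) (field : String) (out : Bool) : Decidable (Spec_is_unique records field out) := by unfold Spec_is_unique; infer_instance

-- ===== CLAIM (what is proved, stated in full; the proofs are below) =====
def Claim_equal_is_unique : Prop := ∀ (records : List (List (String × String))) (field : String), Dom_is_unique records field → Spec_is_unique records field (is_unique records field)

-- ===== LEMMAS AND PROOFS =====

-- the list of field values B extracts
def pvVals (field : String) (records : List (List (String × String))) : List String :=
  records.filterMap (fun r => (PySem.Dict.mk r).get? field)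

theorem pvOfList_sublist (xs : List String) : (PySem.Set.ofList xs).Sublist xs := by
  induction xs with
  | nil => simp [PySem.Set.ofList]
  | cons x xs ih =>
    rw [PySem.Set.ofList_cons]
    exact List.Sublist.cons₂ x (List.Sublist.trans List.filter_sublist ih)

theorem pvLen_ofList_iff (xs : List String) :
    ((PySem.Set.ofList xs).length = xs.length) ↔ xs.Nodup := by
  constructor
  · intro h
    have h2 := (pvOfList_sublist xs).eq_of_length h
    exact h2 ▸ PySem.Set.nodup_ofList (xs := xs)
  · intro h; rw [PySem.Set.ofList_eq_self_of_nodup xs h]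

-- characterisation of A's loop
theorem pvLoop_iff (field : String) (records : List (List (String × String)))
    (seen : PySem.Set String) :
    isUniqueLoop field records seen = true ↔
      ((∀ r ∈ records, ((PySem.Dict.mk r).get? field).isSome) ∧
       (pvVals field records).Nodup ∧
       ∀ v ∈ pvVals field records, ¬ seen.contains v) := by
  induction records generalizing seen with
  | nil => simp [isUniqueLoop, pvVals]
  | cons r rest ih =>
    cases hv : (PySem.Dict.mk r).get? field with
    | none =>
      simp only [isUniqueLoop, hv]
      constructor
      · intro h; cases h
      · rintro ⟨hall, -⟩
        have := hall r (List.mem_cons_self)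
        rw [hv] at this; cases this
    | some v =>
      simp only [isUniqueLoop, hv]
      by_cases hc : PySem.Set.contains seen v = true
      · simp only [hc, if_true]
        constructor
        · intro h; cases h
        · rintro ⟨-, -, hfresh⟩
          exact absurd hc (hfresh v (by simp [pvVals, hv]))
      · rw [if_neg hc, ih]
        have hvals : pvVals field (r :: rest) = v :: pvVals field rest := by
          simp [pvVals, hv]
        rw [hvals]
        constructor
        · rintro ⟨hall, hnd, hfresh⟩
          refine ⟨?_, ?_, ?_⟩
          · intro r' hr'
            rcases List.mem_cons.mp hr' with h | h
            · subst h; simp [hv]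
            · exact hall r' h
          · refine List.nodup_cons.mpr ⟨?_, hnd⟩
            intro hmem
            exact absurd ((PySem.Set.contains_iff _ _).mpr
              ((PySem.Set.mem_add _ _ _).mpr (Or.inr rfl))) (hfresh v hmem)
          · intro w hw
            rcases List.mem_cons.mp hw with h | h
            · subst h; exact hc
            · intro hcon
              have hm : w ∈ seen.add v := (PySem.Set.mem_add seen v w).mpr
                (Or.inl ((PySem.Set.contains_iff _ _).mp hcon))
              exact hfresh w h ((PySem.Set.contains_iff _ _).mpr hm)
        · rintro ⟨hall, hnd, hfresh⟩
          refine ⟨fun r' hr' => hall r' (List.mem_cons_of_mem r hr'), (List.nodup_cons.mp hnd).2, ?_⟩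
          intro w hw hcon
          rcases (PySem.Set.mem_add _ _ _).mp ((PySem.Set.contains_iff _ _).mp hcon) with h | h
          · exact hfresh w (List.mem_cons_of_mem v hw) ((PySem.Set.contains_iff _ _).mpr h)
          · exact (List.nodup_cons.mp hnd).1 (h ▸ hw)

-- characterisation of B
theorem pvAlt_iff (field : String) (records : List (List (String × String))) :
    is_unique_alt records field = true ↔
      ((∀ r ∈ records, ((PySem.Dict.mk r).get? field).isSome) ∧
       (pvVals field records).Nodup) := by
  unfold is_unique_alt
  by_cases hall : records.all (fun r => ((PySem.Dict.mk r).get? field).isSome) = true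
  · rw [if_pos hall]
    have hall' : ∀ r ∈ records, ((PySem.Dict.mk r).get? field).isSome := by
      simpa using hall
    simp only [PySem.Set.len, beq_iff_eq, Nat.cast_inj]
    rw [pvLen_ofList_iff]
    exact ⟨fun h => ⟨hall', h⟩, fun h => h.2⟩
  · rw [if_neg hall]
    constructor
    · intro h; cases h
    · rintro ⟨h, -⟩; exact absurd (by simpa using h) hall

-- ===== VERDICT (by name: the statement is the Claim_ definition above) =====
theorem is_unique_spec : Claim_equal_is_unique := by
  intro records field _
  unfold Spec_is_unique
  rw [Bool.eq_iff_iff]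
  rw [is_unique, pvLoop_iff, pvAlt_iff]
  constructor
  · rintro ⟨hall, hnd, -⟩; exact ⟨hall, hnd⟩
  · rintro ⟨hall, hnd⟩
    exact ⟨hall, hnd, fun v _ hcon => by
      simp [PySem.Set.empty] at hcon⟩
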